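-- pv_equiv track=rewrite | github.com/masanpoc/cs-py | src/computing/data-structures/lists/fit.py | average_heart_rate
-- ===== SOURCE A (Python) =====
-- def average_heart_rate(a_list):
--     started = False
--     count = 0
--     total = 0
--     for i in range(len(a_list)):
--         if a_list[i] >= 100 and not started:
--             started = True
--             count += 1
--             total += a_list[i]
--         elif a_list[i] >= 100:
--             count += 1
--             total += a_list[i]
--         elif a_list[i] < 100 and started:
--             return total // count
-- ===== SOURCE B (Python) =====
-- def average_heart_rate(a_list):
--     n = len(a_list)
--     i = 0
--     while i < n and a_list[i] < 100:
--         i += 1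
--     j = i
--     while j < n and a_list[j] >= 100:
--         j += 1
--     if j == i or j == n:
--         return None
--     return sum(a_list[i:j]) // (j - i)
-- ===== Notes on version B (the rewrite author's own statement) =====
-- stated objective: idiomatic
-- what changed: Replaced the single stateful loop (started/count/total flags with three branches) by a two-phase scan: find the start index of the first >=100 run, find its end index, then return sum(slice)//length, with explicit None when the run is empty or unterminated.
import Mathlib
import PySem

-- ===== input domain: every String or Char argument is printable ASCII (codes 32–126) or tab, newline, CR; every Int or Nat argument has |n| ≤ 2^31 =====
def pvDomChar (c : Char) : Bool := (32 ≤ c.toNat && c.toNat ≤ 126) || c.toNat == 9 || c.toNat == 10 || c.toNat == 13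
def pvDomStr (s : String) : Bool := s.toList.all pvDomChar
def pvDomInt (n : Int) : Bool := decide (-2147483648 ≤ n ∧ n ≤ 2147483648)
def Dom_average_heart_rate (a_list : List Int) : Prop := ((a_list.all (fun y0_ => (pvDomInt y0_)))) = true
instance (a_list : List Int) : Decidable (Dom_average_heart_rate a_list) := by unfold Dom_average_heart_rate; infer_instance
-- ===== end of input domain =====

-- B restructures A's single stateful three-branch loop into an idiomatic two-phase scan
-- (find start of the >=100 run, find its end, average the slice); same values everywhere.


-- ===== PORT A =====
-- A's loop over the list elements carrying (started, count, total); branches in source order.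
def aLoop : List Int → Bool → Int → Int → Option Int
  | [], _, _, _ => none
  | x :: xs, started, count, total =>
    if 100 ≤ x ∧ started = false then aLoop xs true (count + 1) (total + x)
    else if 100 ≤ x then aLoop xs started (count + 1) (total + x)
    else if x < 100 ∧ started = true then some (PySem.Int.floordiv total count)
    else aLoop xs started count total

def average_heart_rate (a_list : List Int) : Option Int :=
  aLoop a_list false 0 0

-- ===== PORT B =====
-- first while loop of Source B: advance i past the < 100 prefix
def bScan1 (a : List Int) (i : Nat) : Nat :=
  if h : i < a.length ∧ a.getD i 0 < 100 then bScan1 a (i + 1) else i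
termination_by a.length - i
decreasing_by omega

-- second while loop of Source B: advance j through the >= 100 run
def bScan2 (a : List Int) (j : Nat) : Nat :=
  if h : j < a.length ∧ 100 ≤ a.getD j 0 then bScan2 a (j + 1) else j
termination_by a.length - j
decreasing_by omega

def average_heart_rate_alt (a_list : List Int) : Option Int :=
  let n := a_list.length
  let i := bScan1 a_list 0
  let j := bScan2 a_list i
  if j = i ∨ j = n then none
  else some (PySem.Int.floordiv (((a_list.drop i).take (j - i)).sum) ((j : Int) - (i : Int)))

-- ===== PRECONDITION & SPEC =====
def Spec_average_heart_rate (a_list : List Int) (out : Option Int) : Prop := out = average_heart_rate_alt a_list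
instance (a_list : List Int) (out : Option Int) : Decidable (Spec_average_heart_rate a_list out) := by unfold Spec_average_heart_rate; infer_instance

-- ===== CLAIM (what is proved, stated in full; the proofs are below) =====
def Claim_equal_average_heart_rate : Prop := ∀ (a_list : List Int), Dom_average_heart_rate a_list → Spec_average_heart_rate a_list (average_heart_rate a_list)

-- ===== LEMMAS AND PROOFS =====

-- the two scans compute index + length of the takeWhile of the dropped suffix
theorem bScan1_eq (a : List Int) (i : Nat) (h : i ≤ a.length) :
    bScan1 a i = i + ((a.drop i).takeWhile (fun x => decide (x < 100))).length := by
  unfold bScan1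
  split
  · rename_i hc
    obtain ⟨hlt, hx⟩ := hc
    have hdrop : a.drop i = a[i] :: a.drop (i + 1) := List.drop_eq_getElem_cons hlt
    have hget : a.getD i 0 = a[i] := by
      simp [List.getD, hlt]
    rw [bScan1_eq a (i + 1) (by omega), hdrop]
    rw [List.takeWhile_cons]
    simp only [hget] at hx
    simp [hx]
    omega
  · rename_i hc
    rcases Nat.lt_or_ge i a.length with hlt | hge
    · have hget : a.getD i 0 = a[i] := by simp [List.getD, hlt]
      have hx : ¬ (a[i] < 100) := by
        intro hcon; exact hc ⟨hlt, by rw [hget]; exact hcon⟩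
      have hdrop : a.drop i = a[i] :: a.drop (i + 1) := List.drop_eq_getElem_cons hlt
      rw [hdrop, List.takeWhile_cons]
      simp [hx]
    · have : a.drop i = [] := List.drop_eq_nil_of_le hge
      simp [this]
termination_by a.length - i
decreasing_by omega

theorem bScan2_eq (a : List Int) (j : Nat) (h : j ≤ a.length) :
    bScan2 a j = j + ((a.drop j).takeWhile (fun x => decide (100 ≤ x))).length := by
  unfold bScan2
  split
  · rename_i hc
    obtain ⟨hlt, hx⟩ := hc
    have hdrop : a.drop j = a[j] :: a.drop (j + 1) := List.drop_eq_getElem_cons hlt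
    have hget : a.getD j 0 = a[j] := by simp [List.getD, hlt]
    rw [bScan2_eq a (j + 1) (by omega), hdrop]
    rw [List.takeWhile_cons]
    simp only [hget] at hx
    simp [hx]
    omega
  · rename_i hc
    rcases Nat.lt_or_ge j a.length with hlt | hge
    · have hget : a.getD j 0 = a[j] := by simp [List.getD, hlt]
      have hx : ¬ (100 ≤ a[j]) := by
        intro hcon; exact hc ⟨hlt, by rw [hget]; exact hcon⟩
      have hdrop : a.drop j = a[j] :: a.drop (j + 1) := List.drop_eq_getElem_cons hlt
      rw [hdrop, List.takeWhile_cons]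
      simp [hx]
    · have : a.drop j = [] := List.drop_eq_nil_of_le hge
      simp [this]
termination_by a.length - j
decreasing_by omega

theorem dropWhile_eq_drop_len (p : Int → Bool) (a : List Int) :
    a.dropWhile p = a.drop (a.takeWhile p).length := by
  induction a with
  | nil => simp
  | cons x xs ih =>
    by_cases hx : p x
    · simp [List.dropWhile_cons, List.takeWhile_cons, hx, ih]
    · simp [List.dropWhile_cons, List.takeWhile_cons, hx]

theorem take_len_takeWhile (p : Int → Bool) (a : List Int) :
    a.take (a.takeWhile p).length = a.takeWhile p := by
  induction a with
  | nil => simp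
  | cons x xs ih =>
    by_cases hx : p x
    · simp [List.takeWhile_cons, hx, ih]
    · simp [List.takeWhile_cons, hx]

-- A's loop in the not-yet-started phase skips the < 100 prefix
theorem aLoop_start (a : List Int) :
    aLoop a false 0 0 =
      match a.dropWhile (fun x => decide (x < 100)) with
      | [] => none
      | x :: xs => aLoop xs true 1 x := by
  induction a with
  | nil => simp [aLoop]
  | cons x xs ih =>
    by_cases hx : 100 ≤ x
    · have hx' : ¬ (x < 100) := by omega
      simp [aLoop, hx, List.dropWhile_cons, hx']
    · have hx' : x < 100 := by omega
      simp [aLoop, hx, hx', List.dropWhile_cons, ih]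

-- A's loop after the run has started, characterized by the takeWhile of the rest
theorem aLoop_run (xs : List Int) : ∀ (c t : Int),
    aLoop xs true c t =
      if (xs.takeWhile (fun x => decide (100 ≤ x))).length = xs.length then none
      else some (PySem.Int.floordiv (t + (xs.takeWhile (fun x => decide (100 ≤ x))).sum)
                  (c + ((xs.takeWhile (fun x => decide (100 ≤ x))).length : Int))) := by
  induction xs with
  | nil => intro c t; simp [aLoop]
  | cons x xs ih =>
    intro c t
    by_cases hx : 100 ≤ x
    · have hx' : ¬ (x < 100) := by omega
      rw [show aLoop (x :: xs) true c t = aLoop xs true (c + 1) (t + x) by simp [aLoop, hx]]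
      rw [ih]
      have htw : (x :: xs).takeWhile (fun y => decide (100 ≤ y)) = x :: xs.takeWhile (fun y => decide (100 ≤ y)) := by
        simp [List.takeWhile_cons, hx]
      rw [htw]
      simp only [List.length_cons, List.sum_cons]
      by_cases h : (List.takeWhile (fun y => decide (100 ≤ y)) xs).length = xs.length
      · rw [if_pos h, if_pos (by omega)]
      · rw [if_neg h, if_neg (by omega)]
        congr 1
        congr 1
        · ring
        · push_cast; ring
    · have hx' : x < 100 := by omega
      rw [show aLoop (x :: xs) true c t = some (PySem.Int.floordiv t c) by simp [aLoop, hx, hx']]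
      have htw : (x :: xs).takeWhile (fun y => decide (100 ≤ y)) = [] := by
        simp [List.takeWhile_cons, hx]
      rw [htw]
      rw [if_neg (by simp)]
      simp

theorem takeWhile_len_le (p : Int → Bool) (a : List Int) : (a.takeWhile p).length ≤ a.length :=
  (List.takeWhile_sublist p).length_le

-- ===== VERDICT (by name: the statement is the Claim_ definition above) =====
theorem average_heart_rate_spec : Claim_equal_average_heart_rate := by
  intro a _
  unfold Spec_average_heart_rate average_heart_rate average_heart_rate_alt
  have hi : bScan1 a 0 = (a.takeWhile (fun x => decide (x < 100))).length := by
    rw [bScan1_eq a 0 (Nat.zero_le _)]; simp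
  have hile : (a.takeWhile (fun x => decide (x < 100))).length ≤ a.length :=
    takeWhile_len_le _ a
  have hdropi : a.drop (a.takeWhile (fun x => decide (x < 100))).length
      = a.dropWhile (fun x => decide (x < 100)) := (dropWhile_eq_drop_len _ a).symm
  rw [aLoop_start]
  cases hr : a.dropWhile (fun x => decide (x < 100)) with
  | nil =>
    have hjv : bScan2 a ((a.takeWhile (fun x => decide (x < 100))).length)
        = (a.takeWhile (fun x => decide (x < 100))).length := by
      rw [bScan2_eq _ _ hile, hdropi, hr]; simp
    simp [hi, hjv]
  | cons x rest =>
    have hne : a.dropWhile (fun x => decide (x < 100)) ≠ [] := by rw [hr]; simp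
    have hx := List.head_dropWhile_not (fun x => decide (x < 100)) hne
    simp only [hr, List.head_cons] at hx
    have hxge : 100 ≤ x := by simpa using hx
    have hlen : a.length
        = (a.takeWhile (fun x => decide (x < 100))).length + (rest.length + 1) := by
      have h2 := congrArg List.length hdropi
      rw [hr] at h2
      simp at h2
      omega
    have hLle : (rest.takeWhile (fun x => decide (100 ≤ x))).length ≤ rest.length :=
      takeWhile_len_le _ rest
    have hjv : bScan2 a ((a.takeWhile (fun x => decide (x < 100))).length)
        = (a.takeWhile (fun x => decide (x < 100))).length + 1
          + (rest.takeWhile (fun x => decide (100 ≤ x))).length := by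
      rw [bScan2_eq _ _ hile, hdropi, hr, List.takeWhile_cons]
      simp [hxge]
      omega
    show aLoop rest true 1 x = _
    rw [aLoop_run]
    by_cases hend : (rest.takeWhile (fun x => decide (100 ≤ x))).length = rest.length
    · rw [if_pos hend]
      simp only [hi, hjv]
      rw [if_pos (Or.inr (by omega))]
    · rw [if_neg hend]
      simp only [hi, hjv]
      rw [if_neg (by push_neg; exact ⟨by omega, by omega⟩)]
      have hslice : (a.drop ((a.takeWhile (fun x => decide (x < 100))).length)).take
          ((a.takeWhile (fun x => decide (x < 100))).length + 1
            + (rest.takeWhile (fun x => decide (100 ≤ x))).length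
            - (a.takeWhile (fun x => decide (x < 100))).length)
          = x :: rest.takeWhile (fun x => decide (100 ≤ x)) := by
        rw [hdropi, hr]
        have he : (a.takeWhile (fun x => decide (x < 100))).length + 1
            + (rest.takeWhile (fun x => decide (100 ≤ x))).length
            - (a.takeWhile (fun x => decide (x < 100))).length
            = (rest.takeWhile (fun x => decide (100 ≤ x))).length + 1 := by omega
        rw [he, List.take_succ_cons, take_len_takeWhile]
      rw [hslice]
      congr 1
      congr 1
      push_cast
      ring
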